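-- pv_equiv track=rewrite | github.com/itsjayeshk/dsa_python | phase3_recursion/task68_number_of_occurances_recursive.py | find_elem
-- ===== SOURCE A (Python) =====
-- def find_elem(n, arr, index=0, indices=None):
--     if indices is None:
--         indices = []
--
--     if index == len(arr):
--         return indices
--
--     if arr[index] == n:
--         indices.append(index)
--
--     return find_elem(n, arr, index + 1, indices)
-- ===== SOURCE B (Python) =====
-- def find_elem(n, arr, index=0, indices=None):
--     if indices is None:
--         indices = []
--     indices.extend(i for i in range(index, len(arr)) if arr[i] == n)
--     return indices
-- ===== Notes on version B (the rewrite author's own statement) =====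
-- stated objective: simpler
-- what changed: Replace A's tail recursion with a None-sentinel accumulator by a single range-based comprehension that extends indices in one pass (same in-place append side effect).
import Mathlib
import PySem

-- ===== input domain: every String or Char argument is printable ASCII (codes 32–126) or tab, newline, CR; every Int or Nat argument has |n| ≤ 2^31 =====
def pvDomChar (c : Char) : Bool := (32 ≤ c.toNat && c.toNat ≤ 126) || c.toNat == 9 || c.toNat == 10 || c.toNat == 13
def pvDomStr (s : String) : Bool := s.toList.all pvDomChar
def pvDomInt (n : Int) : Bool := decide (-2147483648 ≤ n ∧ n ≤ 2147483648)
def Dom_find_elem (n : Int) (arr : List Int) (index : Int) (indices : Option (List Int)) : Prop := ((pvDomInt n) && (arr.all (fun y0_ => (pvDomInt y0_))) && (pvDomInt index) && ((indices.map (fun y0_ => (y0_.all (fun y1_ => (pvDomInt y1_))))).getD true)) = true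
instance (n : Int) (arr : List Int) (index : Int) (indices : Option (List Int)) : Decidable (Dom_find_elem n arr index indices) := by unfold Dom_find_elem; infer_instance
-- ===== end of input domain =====

-- B replaces A's tail recursion by a single range comprehension extending `indices` (simpler);
-- equivalence is about the RETURN value only: both A and B append to a caller-supplied `indices` in place.

-- ===== PORT A =====
-- A's recursion: stop at index = len, look up arr[index] (IndexError → total-making guard, outside Pre_), append on match, recurse on index+1.
def find_elem_go (n : Int) (arr : List Int) (index : Int) (acc : List Int) : List Int :=
  if index = (arr.length : Int) then acc
  else if h : PySem.Raise.InRange arr.length index then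
    find_elem_go n arr (index + 1)
      (if PySem.List.pyGetD arr index 0 = n then acc ++ [index] else acc)
  else acc  -- arr[index] raises IndexError here; excluded by Pre_
termination_by ((arr.length : Int) - index).toNat
decreasing_by
  simp [PySem.Raise.InRange] at h
  omega

def find_elem (n : Int) (arr : List Int) (index : Int) (indices : Option (List Int)) : List Int :=
  find_elem_go n arr index (indices.getD [])

-- ===== PORT B =====
def find_elem_alt (n : Int) (arr : List Int) (index : Int) (indices : Option (List Int)) : List Int :=
  indices.getD [] ++
    (PySem.List.pyRange index (arr.length : Int) 1).filter
      (fun i => PySem.List.pyGet? arr i == some n)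

-- ===== PRECONDITION & SPEC =====
-- Pre_ excludes exactly the inputs where A's arr[index] chain raises IndexError (index outside [-len, len]).
def Pre_find_elem (n : Int) (arr : List Int) (index : Int) (indices : Option (List Int)) : Prop :=
  -(arr.length : Int) ≤ index ∧ index ≤ (arr.length : Int)
instance (n : Int) (arr : List Int) (index : Int) (indices : Option (List Int)) : Decidable (Pre_find_elem n arr index indices) := by unfold Pre_find_elem; infer_instance

def pvWitness_find_elem : Int × List Int × Int × Option (List Int) := (2, [1, 2, 2, 3], 0, none)

def Spec_find_elem (n : Int) (arr : List Int) (index : Int) (indices : Option (List Int)) (out : List Int) : Prop := out = find_elem_alt n arr index indices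
instance (n : Int) (arr : List Int) (index : Int) (indices : Option (List Int)) (out : List Int) : Decidable (Spec_find_elem n arr index indices out) := by unfold Spec_find_elem; infer_instance

-- ===== CLAIM (what is proved, stated in full; the proofs are below) =====
def Claim_equal_find_elem : Prop := ∀ (n : Int) (arr : List Int) (index : Int) (indices : Option (List Int)), Dom_find_elem n arr index indices → Pre_find_elem n arr index indices → Spec_find_elem n arr index indices (find_elem n arr index indices)

-- ===== LEMMAS AND PROOFS =====

theorem find_elem_go_eq (n : Int) (arr : List Int) :
    ∀ (k : Nat) (index : Int) (acc : List Int),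
      (((arr.length : Int) - index).toNat = k) →
      -(arr.length : Int) ≤ index → index ≤ (arr.length : Int) →
      find_elem_go n arr index acc =
        acc ++ (PySem.List.pyRange index (arr.length : Int) 1).filter
          (fun i => PySem.List.pyGet? arr i == some n) := by
  intro k
  induction k with
  | zero =>
    intro index acc hk h1 h2
    have hidx : index = (arr.length : Int) := by omega
    rw [find_elem_go, if_pos hidx,
      PySem.List.pyRange_one_eq_nil (by omega), List.filter_nil, List.append_nil]
  | succ k ih =>
    intro index acc hk h1 h2
    have hlt : index < (arr.length : Int) := by omega
    have hin : PySem.Raise.InRange arr.length index := by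
      simp [PySem.Raise.InRange]; omega
    rw [find_elem_go, if_neg (by omega), dif_pos hin,
      ih (index + 1) _ (by omega) (by omega) (by omega),
      PySem.List.pyRange_one_cons hlt, List.filter_cons]
    have hg : PySem.List.pyGet? arr index = some (PySem.List.pyGetD arr index 0) := by
      rcases hgo : PySem.List.pyGet? arr index with _ | v
      · exact absurd hin ((PySem.List.pyGet?_eq_none_iff arr index).1 hgo)
      · simp [PySem.List.pyGetD, hgo]
    by_cases hv : PySem.List.pyGetD arr index 0 = n
    · simp [hv, hg]
    · simp [hv, hg]

-- ===== VERDICT (by name: the statement is the Claim_ definition above) =====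
theorem find_elem_spec : Claim_equal_find_elem := by
  intro n arr index indices _ hpre
  unfold Spec_find_elem find_elem find_elem_alt
  exact find_elem_go_eq n arr _ index _ rfl hpre.1 hpre.2
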